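-- pv_equiv track=rewrite | github.com/urban-buss/cellarbrain | src/cellarbrain/incremental.py | _match_by_fingerprint
-- ===== SOURCE A (Python) =====
-- def _match_by_fingerprint(
--     candidates: list[tuple[int, bool]],
--     csv_fp: tuple[str, str, str, str, str],
--     fp_index: dict[int, tuple[str, str, str, str, str]],
-- ) -> int | None:
--     """Find the best fingerprint match among candidates.
--
--     Tries exact fingerprint match first, then cascading partial matches
--     (volume → classification → grapes → category → price), then
--     positional as last resort.
--     """
--     if not candidates:
--         return None
--
--     if len(candidates) == 1:
--         return candidates[0][0]
--
--     # Exact fingerprint match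
--     for wid, _ in candidates:
--         if fp_index.get(wid) == csv_fp:
--             return wid
--
--     # Cascading partial match
--     for field_idx in range(5):
--         partial = [
--             (wid, d)
--             for wid, d in candidates
--             if fp_index.get(wid, ("",) * 5)[field_idx] == csv_fp[field_idx] and csv_fp[field_idx]
--         ]
--         if len(partial) == 1:
--             return partial[0][0]
--
--     # Last resort: positional (first unconsumed)
--     return candidates[0][0]
-- ===== SOURCE B (Python) =====
-- def _match_by_fingerprint(candidates, csv_fp, fp_index):
--     if not candidates:
--         return None
--     if len(candidates) == 1:
--         return candidates[0][0]
--     # Single pass: fold exact-match detection and per-field match COUNTING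
--     # into one traversal.  No partial lists are ever built: each field keeps
--     # only (match count, first matching wid); a field identifies a unique
--     # candidate iff its final count is exactly 1.
--     empty = ("",) * 5
--     exact = None
--     fields = [(0, None)] * 5  # per field: (match count, first matching wid)
--     for wid, _ in candidates:
--         if exact is None and fp_index.get(wid) == csv_fp:
--             exact = wid
--         fp = fp_index.get(wid, empty)
--         for i in range(5):
--             if csv_fp[i] and fp[i] == csv_fp[i]:
--                 cnt, rep = fields[i]
--                 fields[i] = (cnt + 1, wid if cnt == 0 else rep)
--     if exact is not None:
--         return exact
--     for cnt, rep in fields: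
--         if cnt == 1:
--             return rep
--     return candidates[0][0]
-- ===== Notes on version B (the rewrite author's own statement) =====
-- stated objective: alternative
-- what changed: A's staged passes (an exact-match scan, then five list-comprehension filters that materialise partial-match lists) are replaced by one combined pass that keeps only scalar accumulators - the first exact match and, per field, a (match count, first matching wid) pair - followed by a constant-size decision over the five counters; no intermediate lists are built.
import Mathlib
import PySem

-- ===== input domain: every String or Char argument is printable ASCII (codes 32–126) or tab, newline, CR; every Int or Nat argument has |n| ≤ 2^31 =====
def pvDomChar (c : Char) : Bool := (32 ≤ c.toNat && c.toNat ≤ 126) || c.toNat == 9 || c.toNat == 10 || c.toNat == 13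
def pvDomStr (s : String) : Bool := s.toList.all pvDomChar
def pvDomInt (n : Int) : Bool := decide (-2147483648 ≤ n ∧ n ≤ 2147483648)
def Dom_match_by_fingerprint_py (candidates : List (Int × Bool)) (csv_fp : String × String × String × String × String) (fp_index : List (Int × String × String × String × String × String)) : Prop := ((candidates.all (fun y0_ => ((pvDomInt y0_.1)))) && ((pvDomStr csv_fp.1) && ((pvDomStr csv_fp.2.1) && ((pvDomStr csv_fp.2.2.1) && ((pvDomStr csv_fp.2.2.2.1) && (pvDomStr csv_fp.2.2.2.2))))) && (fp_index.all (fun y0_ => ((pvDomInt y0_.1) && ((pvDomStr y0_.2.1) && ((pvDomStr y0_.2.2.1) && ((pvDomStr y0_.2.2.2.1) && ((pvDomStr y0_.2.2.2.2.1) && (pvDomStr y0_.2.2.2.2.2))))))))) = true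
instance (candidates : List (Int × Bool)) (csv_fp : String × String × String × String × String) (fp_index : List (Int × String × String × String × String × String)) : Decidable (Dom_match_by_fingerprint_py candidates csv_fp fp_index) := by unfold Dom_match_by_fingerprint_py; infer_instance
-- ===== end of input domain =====

-- B replaces A's staged passes (exact scan + five materialised partial-match
-- lists) by ONE pass keeping only scalar accumulators — the first exact match
-- and a (count, first wid) pair per field (objective: alternative; same cost).

-- ===== PORT A =====

def fpField (t : String × String × String × String × String) (i : Nat) : String :=
  match i with
  | 0 => t.1
  | 1 => t.2.1
  | 2 => t.2.2.1
  | 3 => t.2.2.2.1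
  | _ => t.2.2.2.2

-- A: 'for wid, _ in candidates: if fp_index.get(wid) == csv_fp: return wid'
def pvAExact (fp_index : List (Int × String × String × String × String × String)) (csv_fp : String × String × String × String × String) : List (Int × Bool) → Option Int
  | [] => none
  | (wid, _) :: rest =>
    if (PySem.Dict.mk fp_index).get? wid == some csv_fp then some wid
    else pvAExact fp_index csv_fp rest

-- A: the list comprehension for one field_idx
def pvAPartial (candidates : List (Int × Bool)) (csv_fp : String × String × String × String × String) (fp_index : List (Int × String × String × String × String × String)) (i : Nat) : List (Int × Bool) :=
  candidates.filter (fun c =>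
    (fpField ((PySem.Dict.mk fp_index).getD c.1 ("", "", "", "", "")) i == fpField csv_fp i)
      && (fpField csv_fp i != ""))

-- A: 'for field_idx in range(5): … if len(partial) == 1: return partial[0][0]'
def pvACascade (candidates : List (Int × Bool)) (csv_fp : String × String × String × String × String) (fp_index : List (Int × String × String × String × String × String)) : List Nat → Option Int
  | [] => none
  | i :: rest =>
    let p := pvAPartial candidates csv_fp fp_index i
    if p.length == 1 then p.head?.map Prod.fst
    else pvACascade candidates csv_fp fp_index rest

def match_by_fingerprint_py (candidates : List (Int × Bool)) (csv_fp : String × String × String × String × String) (fp_index : List (Int × String × String × String × String × String)) : Option Int :=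
  match candidates with
  | [] => none
  | (w0, _) :: rest =>
    if rest.isEmpty then some w0
    else
      match pvAExact fp_index csv_fp candidates with
      | some wid => some wid
      | none =>
        match pvACascade candidates csv_fp fp_index [0, 1, 2, 3, 4] with
        | some wid => some wid
        | none => some w0

-- ===== PORT B =====

-- B's per-field accumulator block: fields = [(0, None)] * 5
def pvFGet (b : (Nat × Option Int) × (Nat × Option Int) × (Nat × Option Int) × (Nat × Option Int) × (Nat × Option Int)) (i : Nat) : Nat × Option Int :=
  match i with
  | 0 => b.1
  | 1 => b.2.1
  | 2 => b.2.2.1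
  | 3 => b.2.2.2.1
  | _ => b.2.2.2.2

-- B: 'cnt, rep = fields[i]; fields[i] = (cnt + 1, wid if cnt == 0 else rep)'
def pvPairUpd (p : Nat × Option Int) (w : Int) : Nat × Option Int :=
  (p.1 + 1, if p.1 == 0 then some w else p.2)

def pvFApp (b : (Nat × Option Int) × (Nat × Option Int) × (Nat × Option Int) × (Nat × Option Int) × (Nat × Option Int)) (i : Nat) (w : Int) : (Nat × Option Int) × (Nat × Option Int) × (Nat × Option Int) × (Nat × Option Int) × (Nat × Option Int) :=
  match i with
  | 0 => (pvPairUpd b.1 w, b.2.1, b.2.2.1, b.2.2.2.1, b.2.2.2.2)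
  | 1 => (b.1, pvPairUpd b.2.1 w, b.2.2.1, b.2.2.2.1, b.2.2.2.2)
  | 2 => (b.1, b.2.1, pvPairUpd b.2.2.1 w, b.2.2.2.1, b.2.2.2.2)
  | 3 => (b.1, b.2.1, b.2.2.1, pvPairUpd b.2.2.2.1 w, b.2.2.2.2)
  | _ => (b.1, b.2.1, b.2.2.1, b.2.2.2.1, pvPairUpd b.2.2.2.2 w)

-- B: 'if exact is None and fp_index.get(wid) == csv_fp: exact = wid'
def pvExUpd (csv_fp : String × String × String × String × String) (fp_index : List (Int × String × String × String × String × String)) (e : Option Int) (c : Int × Bool) : Option Int :=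
  match e with
  | some w => some w
  | none => if (PySem.Dict.mk fp_index).get? c.1 == some csv_fp then some c.1 else none

-- B: the inner 'for i in range(5)' counting loop of one candidate
def pvFldUpd (csv_fp : String × String × String × String × String) (fp_index : List (Int × String × String × String × String × String)) (b : (Nat × Option Int) × (Nat × Option Int) × (Nat × Option Int) × (Nat × Option Int) × (Nat × Option Int)) (c : Int × Bool) : (Nat × Option Int) × (Nat × Option Int) × (Nat × Option Int) × (Nat × Option Int) × (Nat × Option Int) :=
  let fp := (PySem.Dict.mk fp_index).getD c.1 ("", "", "", "", "")
  [0, 1, 2, 3, 4].foldl (fun b i =>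
    if (fpField csv_fp i != "") && (fpField fp i == fpField csv_fp i)
    then pvFApp b i c.1 else b) b

-- B: body of the single candidate pass (exact update, then counting loop)
def pvBStep (csv_fp : String × String × String × String × String) (fp_index : List (Int × String × String × String × String × String)) (st : Option Int × ((Nat × Option Int) × (Nat × Option Int) × (Nat × Option Int) × (Nat × Option Int) × (Nat × Option Int))) (c : Int × Bool) : Option Int × ((Nat × Option Int) × (Nat × Option Int) × (Nat × Option Int) × (Nat × Option Int) × (Nat × Option Int)) :=
  (pvExUpd csv_fp fp_index st.1 c, pvFldUpd csv_fp fp_index st.2 c)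

-- B: 'for cnt, rep in fields: if cnt == 1: return rep'
def pvBScan (b : (Nat × Option Int) × (Nat × Option Int) × (Nat × Option Int) × (Nat × Option Int) × (Nat × Option Int)) : List Nat → Option (Option Int)
  | [] => none
  | i :: rest =>
    if (pvFGet b i).1 == 1 then some (pvFGet b i).2 else pvBScan b rest

def pvInitF : (Nat × Option Int) × (Nat × Option Int) × (Nat × Option Int) × (Nat × Option Int) × (Nat × Option Int) :=
  ((0, none), (0, none), (0, none), (0, none), (0, none))

def match_by_fingerprint_py_alt (candidates : List (Int × Bool)) (csv_fp : String × String × String × String × String) (fp_index : List (Int × String × String × String × String × String)) : Option Int :=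
  match candidates with
  | [] => none
  | (w0, _) :: rest =>
    if rest.isEmpty then some w0
    else
      let st := candidates.foldl (pvBStep csv_fp fp_index) (none, pvInitF)
      match st.1 with
      | some wid => some wid
      | none =>
        match pvBScan st.2 [0, 1, 2, 3, 4] with
        | some r => r
        | none => some w0

-- ===== PRECONDITION & SPEC =====
def Spec_match_by_fingerprint_py (candidates : List (Int × Bool)) (csv_fp : String × String × String × String × String) (fp_index : List (Int × String × String × String × String × String)) (out : Option Int) : Prop := out = match_by_fingerprint_py_alt candidates csv_fp fp_index
instance (candidates : List (Int × Bool)) (csv_fp : String × String × String × String × String) (fp_index : List (Int × String × String × String × String × String)) (out : Option Int) : Decidable (Spec_match_by_fingerprint_py candidates csv_fp fp_index out) := by unfold Spec_match_by_fingerprint_py; infer_instance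

-- ===== CLAIM (what is proved, stated in full; the proofs are below) =====
def Claim_equal_match_by_fingerprint_py : Prop := ∀ (candidates : List (Int × Bool)) (csv_fp : String × String × String × String × String) (fp_index : List (Int × String × String × String × String × String)), Dom_match_by_fingerprint_py candidates csv_fp fp_index → Spec_match_by_fingerprint_py candidates csv_fp fp_index (match_by_fingerprint_py candidates csv_fp fp_index)

-- ===== LEMMAS AND PROOFS =====

-- B's per-candidate predicate for field i (the counting-loop condition)
def pvPredB (csv_fp : String × String × String × String × String) (fp_index : List (Int × String × String × String × String × String)) (i : Nat) (c : Int × Bool) : Bool :=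
  (fpField csv_fp i != "") && (fpField ((PySem.Dict.mk fp_index).getD c.1 ("", "", "", "", "")) i == fpField csv_fp i)

theorem pvPartial_comm (l : List (Int × Bool)) (csv_fp : String × String × String × String × String) (fp_index : List (Int × String × String × String × String × String)) (i : Nat) :
    pvAPartial l csv_fp fp_index i = l.filter (pvPredB csv_fp fp_index i) := by
  unfold pvAPartial pvPredB
  apply List.filter_congr
  intro c _
  rw [Bool.and_comm]

-- the fold over the candidate list splits into independent exact/field folds
theorem pvFold_split (csv_fp : String × String × String × String × String) (fp_index : List (Int × String × String × String × String × String)) (l : List (Int × Bool)) (e : Option Int) (b : (Nat × Option Int) × (Nat × Option Int) × (Nat × Option Int) × (Nat × Option Int) × (Nat × Option Int)) :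
    l.foldl (pvBStep csv_fp fp_index) (e, b) =
      (l.foldl (pvExUpd csv_fp fp_index) e, l.foldl (pvFldUpd csv_fp fp_index) b) := by
  induction l generalizing e b with
  | nil => rfl
  | cons c rest ih => simpa [pvBStep] using ih (pvExUpd csv_fp fp_index e c) (pvFldUpd csv_fp fp_index b c)

theorem pvExFold_some (csv_fp : String × String × String × String × String) (fp_index : List (Int × String × String × String × String × String)) (l : List (Int × Bool)) (w : Int) :
    l.foldl (pvExUpd csv_fp fp_index) (some w) = some w := by
  induction l with
  | nil => rfl
  | cons c rest ih => simpa [pvExUpd] using ih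

theorem pvExFold_eq_exact (csv_fp : String × String × String × String × String) (fp_index : List (Int × String × String × String × String × String)) (l : List (Int × Bool)) :
    l.foldl (pvExUpd csv_fp fp_index) none = pvAExact fp_index csv_fp l := by
  induction l with
  | nil => rfl
  | cons c rest ih =>
    obtain ⟨wid, d⟩ := c
    by_cases h : ((PySem.Dict.mk fp_index).get? wid == some csv_fp) = true
    · simp [pvExUpd, pvAExact, h, pvExFold_some]
    · simp only [Bool.not_eq_true] at h
      simp [pvExUpd, pvAExact, h, ih]

theorem pvFldUpd_get (csv_fp : String × String × String × String × String) (fp_index : List (Int × String × String × String × String × String)) (b : (Nat × Option Int) × (Nat × Option Int) × (Nat × Option Int) × (Nat × Option Int) × (Nat × Option Int)) (c : Int × Bool) (i : Nat) (hi : i < 5) :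
    pvFGet (pvFldUpd csv_fp fp_index b c) i =
      if pvPredB csv_fp fp_index i c then pvPairUpd (pvFGet b i) c.1 else pvFGet b i := by
  interval_cases i <;>
    · simp only [pvFldUpd, pvPredB, List.foldl_cons, List.foldl_nil]
      split_ifs <;> rfl

-- combined result of fold over l on one field accumulator
def pvCombine (p : Nat × Option Int) (f : List (Int × Bool)) : Nat × Option Int :=
  (p.1 + f.length, match f.head? with
    | some c => if p.1 == 0 then some c.1 else p.2
    | none => p.2)

theorem pvFldFold_get (csv_fp : String × String × String × String × String) (fp_index : List (Int × String × String × String × String × String)) (l : List (Int × Bool)) (b : (Nat × Option Int) × (Nat × Option Int) × (Nat × Option Int) × (Nat × Option Int) × (Nat × Option Int)) (i : Nat) (hi : i < 5) :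
    pvFGet (l.foldl (pvFldUpd csv_fp fp_index) b) i =
      pvCombine (pvFGet b i) (l.filter (pvPredB csv_fp fp_index i)) := by
  induction l generalizing b with
  | nil => simp [pvCombine]
  | cons c rest ih =>
    rw [List.foldl_cons, ih (pvFldUpd csv_fp fp_index b c),
      pvFldUpd_get csv_fp fp_index b c i hi, List.filter_cons]
    by_cases h : pvPredB csv_fp fp_index i c = true
    · simp only [h, if_true]
      unfold pvCombine pvPairUpd
      simp only [List.head?_cons, List.length_cons, Prod.mk.injEq]
      refine ⟨by omega, ?_⟩
      cases hf : (rest.filter (pvPredB csv_fp fp_index i)).head? with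
      | none => rfl
      | some c2 => simp
    · simp [h]

theorem pvScan_eq_cascade (candidates : List (Int × Bool)) (csv_fp : String × String × String × String × String) (fp_index : List (Int × String × String × String × String × String)) (l : List Nat) (hl : ∀ i ∈ l, i < 5) :
    pvBScan (candidates.foldl (pvFldUpd csv_fp fp_index) pvInitF) l =
      (pvACascade candidates csv_fp fp_index l).map some := by
  induction l with
  | nil => rfl
  | cons i rest ih =>
    have hi : i < 5 := hl i (by simp)
    have hinit : pvFGet pvInitF i = (0, none) := by interval_cases i <;> rfl
    simp only [pvBScan, pvACascade, pvPartial_comm,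
      pvFldFold_get csv_fp fp_index candidates pvInitF i hi, hinit]
    set F := candidates.filter (pvPredB csv_fp fp_index i) with hF
    by_cases h : F.length = 1
    · obtain ⟨c, hc⟩ := List.length_eq_one_iff.mp h
      rw [hc]
      simp [pvCombine]
    · have hb : ((pvCombine (0, none) F).1 == 1) = false := by simp [pvCombine, h]
      have hb2 : (F.length == 1) = false := by simp [h]
      simp only [hb, hb2, Bool.false_eq_true, if_false]
      exact ih (fun j hj => hl j (by simp [hj]))

-- ===== VERDICT (by name: the statement is the Claim_ definition above) =====
theorem match_by_fingerprint_py_spec : Claim_equal_match_by_fingerprint_py := by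
  intro candidates csv_fp fp_index _
  unfold Spec_match_by_fingerprint_py match_by_fingerprint_py match_by_fingerprint_py_alt
  cases candidates with
  | nil => rfl
  | cons c rest =>
    obtain ⟨w0, d⟩ := c
    by_cases hr : rest.isEmpty
    · simp [hr]
    · simp only [hr, if_false, Bool.false_eq_true]
      rw [pvFold_split, pvExFold_eq_exact]
      cases hE : pvAExact fp_index csv_fp ((w0, d) :: rest) with
      | some w => rfl
      | none =>
        simp only
        rw [pvScan_eq_cascade ((w0, d) :: rest) csv_fp fp_index [0, 1, 2, 3, 4] (by decide)]
        cases pvACascade ((w0, d) :: rest) csv_fp fp_index [0, 1, 2, 3, 4] <;> rfl
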